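-- pv_equiv track=rewrite | github.com/sethirus/The-Thiele-Machine | scripts/audit_kernel_toe_assumptions.py | strip_coq_comments
-- ===== SOURCE A (Python) =====
-- def strip_coq_comments(src: str) -> str:
--     """Remove nested Coq comments `(* ... *)` conservatively."""
--
--     out: list[str] = []
--     i = 0
--     depth = 0
--     n = len(src)
--     while i < n:
--         if i + 1 < n and src[i] == "(" and src[i + 1] == "*":
--             depth += 1
--             i += 2
--             continue
--         if depth > 0 and i + 1 < n and src[i] == "*" and src[i + 1] == ")":
--             depth -= 1
--             i += 2
--             continue
--         if depth == 0:
--             out.append(src[i])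
--         i += 1
--     return "".join(out)
-- ===== SOURCE B (Python) =====
-- def strip_coq_comments(src: str) -> str:
--     """Remove nested Coq comments `(* ... *)` conservatively."""
--     out = []
--     i = 0
--     depth = 0
--     n = len(src)
--     while i < n:
--         if depth == 0:
--             j = src.find("(*", i)
--             if j == -1:
--                 out.append(src[i:])
--                 break
--             out.append(src[i:j])
--             depth = 1
--             i = j + 2
--         else:
--             o = src.find("(*", i)
--             c = src.find("*)", i)
--             if o == -1 and c == -1:
--                 break
--             if o != -1 and (c == -1 or o < c):
--                 depth += 1
--                 i = o + 2
--             else: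
--                 depth -= 1
--                 i = c + 2
--     return "".join(out)
-- ===== Notes on version B (the rewrite author's own statement) =====
-- stated objective: faster
-- what changed: Replaced the per-character depth automaton with a find/slice scanner that copies whole uncommented slices and jumps marker to marker, choosing the nearer of the next comment-open or comment-close via min-of-find.
import Mathlib
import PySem

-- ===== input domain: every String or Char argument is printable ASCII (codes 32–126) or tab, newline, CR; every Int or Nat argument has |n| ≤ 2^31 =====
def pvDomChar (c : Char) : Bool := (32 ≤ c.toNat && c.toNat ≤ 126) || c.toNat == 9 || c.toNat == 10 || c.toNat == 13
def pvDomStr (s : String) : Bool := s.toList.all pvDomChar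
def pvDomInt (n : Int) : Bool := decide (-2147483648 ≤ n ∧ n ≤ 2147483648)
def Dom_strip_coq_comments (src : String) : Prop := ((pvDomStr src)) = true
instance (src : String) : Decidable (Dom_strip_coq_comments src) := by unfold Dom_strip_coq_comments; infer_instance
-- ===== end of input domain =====

-- B replaces A's per-character depth automaton by a find/slice scanner that jumps
-- marker-to-marker (objective: faster by a constant factor, measured).

-- ===== PORT A =====
-- A's while loop over index i with 2-char lookahead, transcribed as structural
-- recursion on the character list (head = src[i], second element = src[i+1]).
def goA : List Char → Nat → List Char
  | [], _ => []
  | [c], d => if d = 0 then [c] else []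
  | c1 :: c2 :: rest, d =>
    if c1 = '(' ∧ c2 = '*' then goA rest (d + 1)
    else if 0 < d ∧ c1 = '*' ∧ c2 = ')' then goA rest (d - 1)
    else (if d = 0 then [c1] else []) ++ goA (c2 :: rest) d

def strip_coq_comments (src : String) : String :=
  String.ofList (goA src.toList 0)

-- ===== PORT B =====
-- src.find("(*", i) relative to the current suffix: index of the first "(*" (none = -1).
def findOpen : List Char → Option Nat
  | [] => none
  | [_] => none
  | c1 :: c2 :: rest =>
    if c1 = '(' ∧ c2 = '*' then some 0
    else (findOpen (c2 :: rest)).map (· + 1)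

-- src.find("*)", i) relative to the current suffix.
def findClose : List Char → Option Nat
  | [] => none
  | [_] => none
  | c1 :: c2 :: rest =>
    if c1 = '*' ∧ c2 = ')' then some 0
    else (findClose (c2 :: rest)).map (· + 1)

theorem findOpen_le {l : List Char} {j : Nat} (h : findOpen l = some j) : j + 2 ≤ l.length := by
  induction l generalizing j with
  | nil => simp [findOpen] at h
  | cons c1 tail ih =>
    cases tail with
    | nil => simp [findOpen] at h
    | cons c2 rest =>
      rw [findOpen] at h
      split at h
      · obtain rfl : j = 0 := by simpa using h.symm
        simp
      · simp only [Option.map_eq_some_iff] at h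
        obtain ⟨j', hj', rfl⟩ := h
        have := ih hj'
        simp at this ⊢
        omega

theorem findClose_le {l : List Char} {j : Nat} (h : findClose l = some j) : j + 2 ≤ l.length := by
  induction l generalizing j with
  | nil => simp [findClose] at h
  | cons c1 tail ih =>
    cases tail with
    | nil => simp [findClose] at h
    | cons c2 rest =>
      rw [findClose] at h
      split at h
      · obtain rfl : j = 0 := by simpa using h.symm
        simp
      · simp only [Option.map_eq_some_iff] at h
        obtain ⟨j', hj', rfl⟩ := h
        have := ih hj'
        simp at this ⊢
        omega

-- B's while loop: at depth 0 copy the slice up to the next "(*"; at depth > 0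
-- jump to the nearer of the next "(*" / "*)" (break and discard the tail if neither exists).
def goB : List Char → Nat → List Char
  | s, 0 =>
    match h : findOpen s with
    | none => s
    | some j => s.take j ++ goB (s.drop (j + 2)) 1
  | s, (d + 1) =>
    match h1 : findOpen s, h2 : findClose s with
    | none, none => []
    | some o, none => goB (s.drop (o + 2)) (d + 2)
    | none, some c => goB (s.drop (c + 2)) d
    | some o, some c =>
      if o < c then goB (s.drop (o + 2)) (d + 2) else goB (s.drop (c + 2)) d
  termination_by s _ => s.length
  decreasing_by
  · have := findOpen_le h; simp; omega
  · have := findOpen_le h1; simp; omega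
  · have := findClose_le h2; simp; omega
  · have := findOpen_le h1; simp; omega
  · have := findClose_le h2; simp; omega

def strip_coq_comments_alt (src : String) : String :=
  String.ofList (goB src.toList 0)

-- ===== PRECONDITION & SPEC =====
def Spec_strip_coq_comments (src : String) (out : String) : Prop := out = strip_coq_comments_alt src
instance (src : String) (out : String) : Decidable (Spec_strip_coq_comments src out) := by unfold Spec_strip_coq_comments; infer_instance

-- ===== CLAIM (what is proved, stated in full; the proofs are below) =====
def Claim_equal_strip_coq_comments : Prop := ∀ (src : String), Dom_strip_coq_comments src → Spec_strip_coq_comments src (strip_coq_comments src)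

-- ===== LEMMAS AND PROOFS =====

-- goA at depth 0 copies everything up to the first "(*", then enters depth 1.
theorem goA_zero_none {s : List Char} (h : findOpen s = none) : goA s 0 = s := by
  induction s with
  | nil => simp [goA]
  | cons c1 tail ih =>
    cases tail with
    | nil => simp [goA]
    | cons c2 rest =>
      rw [findOpen] at h
      rw [goA]
      split at h
      · simp_all
      · rename_i hne
        simp only [Option.map_eq_none_iff] at h
        rw [if_neg hne, if_neg (by simp)]
        simp [ih h]

theorem goA_zero_some {s : List Char} {j : Nat} (h : findOpen s = some j) :
    goA s 0 = s.take j ++ goA (s.drop (j + 2)) 1 := by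
  induction s generalizing j with
  | nil => simp [findOpen] at h
  | cons c1 tail ih =>
    cases tail with
    | nil => simp [findOpen] at h
    | cons c2 rest =>
      rw [findOpen] at h
      rw [goA]
      split at h
      · rename_i hm
        obtain rfl : j = 0 := by simpa using h.symm
        simp [hm.1, hm.2]
      · rename_i hne
        simp only [Option.map_eq_some_iff] at h
        obtain ⟨j', hj', rfl⟩ := h
        rw [if_neg hne, if_neg (by simp)]
        simp [ih hj', List.take_succ_cons]

-- goA at positive depth with no remaining marker discards everything.
theorem goA_pos_none {s : List Char} {d : Nat}
    (h1 : findOpen s = none) (h2 : findClose s = none) : goA s (d + 1) = [] := by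
  induction s with
  | nil => simp [goA]
  | cons c1 tail ih =>
    cases tail with
    | nil => simp [goA]
    | cons c2 rest =>
      rw [findOpen] at h1
      rw [findClose] at h2
      rw [goA]
      split at h1
      · simp_all
      · rename_i hno
        split at h2
        · simp_all
        · rename_i hnc
          simp only [Option.map_eq_none_iff] at h1 h2
          rw [if_neg hno, if_neg (fun h => hnc ⟨h.2.1, h.2.2⟩)]
          simpa using ih h1 h2

-- goA at positive depth jumps to the first "(*" when it precedes any "*)".
theorem goA_pos_open {s : List Char} {d o : Nat}
    (h1 : findOpen s = some o)
    (h2 : findClose s = none ∨ ∃ c, findClose s = some c ∧ o < c) :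
    goA s (d + 1) = goA (s.drop (o + 2)) (d + 2) := by
  induction s generalizing o with
  | nil => simp [findOpen] at h1
  | cons c1 tail ih =>
    cases tail with
    | nil => simp [findOpen] at h1
    | cons c2 rest =>
      rw [findOpen] at h1
      rw [goA]
      split at h1
      · rename_i hm
        obtain rfl : o = 0 := by simpa using h1.symm
        simp [hm.1, hm.2]
      · rename_i hno
        simp only [Option.map_eq_some_iff] at h1
        obtain ⟨o', ho', rfl⟩ := h1
        -- "*)" cannot match at position 0 here: its index would be 0 < o' + 1.
        have hnc : ¬ (c1 = '*' ∧ c2 = ')') := by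
          intro hc
          rw [findClose, if_pos hc] at h2
          rcases h2 with h | ⟨c, hc2, hlt⟩
          · exact absurd h (by simp)
          · obtain rfl : c = 0 := by simpa using hc2.symm
            omega
        have h2' : findClose (c2 :: rest) = none ∨
            ∃ c, findClose (c2 :: rest) = some c ∧ o' < c := by
          rw [findClose, if_neg hnc] at h2
          rcases h2 with h | ⟨c, hc2, hlt⟩
          · exact Or.inl (by simpa using h)
          · simp only [Option.map_eq_some_iff] at hc2
            obtain ⟨c', hc', rfl⟩ := hc2
            exact Or.inr ⟨c', hc', by omega⟩
        rw [if_neg hno, if_neg (by intro h; exact hnc ⟨h.2.1, h.2.2⟩)]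
        simpa using ih ho' h2'

-- goA at positive depth jumps to the first "*)" when it precedes any "(*".
theorem goA_pos_close {s : List Char} {d c : Nat}
    (h2 : findClose s = some c)
    (h1 : findOpen s = none ∨ ∃ o, findOpen s = some o ∧ c < o) :
    goA s (d + 1) = goA (s.drop (c + 2)) d := by
  induction s generalizing c with
  | nil => simp [findClose] at h2
  | cons c1 tail ih =>
    cases tail with
    | nil => simp [findClose] at h2
    | cons c2 rest =>
      rw [findClose] at h2
      rw [goA]
      -- "(*" cannot match at position 0: its index would be 0 ≤ c.
      have hno : ¬ (c1 = '(' ∧ c2 = '*') := by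
        intro ho
        rw [findOpen, if_pos ho] at h1
        rcases h1 with h | ⟨o, ho2, hlt⟩
        · exact absurd h (by simp)
        · obtain rfl : o = 0 := by simpa using ho2.symm
          omega
      split at h2
      · rename_i hm
        obtain rfl : c = 0 := by simpa using h2.symm
        rw [if_neg hno, if_pos ⟨Nat.succ_pos d, hm.1, hm.2⟩]
        simp
      · rename_i hnc
        simp only [Option.map_eq_some_iff] at h2
        obtain ⟨c', hc', rfl⟩ := h2
        have h1' : findOpen (c2 :: rest) = none ∨
            ∃ o, findOpen (c2 :: rest) = some o ∧ c' < o := by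
          rw [findOpen, if_neg hno] at h1
          rcases h1 with h | ⟨o, ho2, hlt⟩
          · exact Or.inl (by simpa using h)
          · simp only [Option.map_eq_some_iff] at ho2
            obtain ⟨o', ho', rfl⟩ := ho2
            exact Or.inr ⟨o', ho', by omega⟩
        rw [if_neg hno, if_neg (by intro h; exact hnc ⟨h.2.1, h.2.2⟩)]
        simpa using ih hc' h1'


-- The character at a found "(*" is '(' and at a found "*)" is '*'; hence the two finds differ.
theorem findOpen_get {l : List Char} {j : Nat} (h : findOpen l = some j) : l[j]? = some '(' := by
  induction l generalizing j with
  | nil => simp [findOpen] at h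
  | cons c1 tail ih =>
    cases tail with
    | nil => simp [findOpen] at h
    | cons c2 rest =>
      rw [findOpen] at h
      split at h
      · rename_i hm
        obtain rfl : j = 0 := by simpa using h.symm
        simp [hm.1]
      · simp only [Option.map_eq_some_iff] at h
        obtain ⟨j', hj', rfl⟩ := h
        simpa using ih hj'

theorem findClose_get {l : List Char} {j : Nat} (h : findClose l = some j) : l[j]? = some '*' := by
  induction l generalizing j with
  | nil => simp [findClose] at h
  | cons c1 tail ih =>
    cases tail with
    | nil => simp [findClose] at h
    | cons c2 rest =>
      rw [findClose] at h
      split at h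
      · rename_i hm
        obtain rfl : j = 0 := by simpa using h.symm
        simp [hm.1]
      · simp only [Option.map_eq_some_iff] at h
        obtain ⟨j', hj', rfl⟩ := h
        simpa using ih hj'

-- The two loops agree at every suffix and depth.
theorem goB_eq_goA (s : List Char) (d : Nat) : goB s d = goA s d := by
  induction hn : s.length using Nat.strong_induction_on generalizing s d with
  | _ n ih =>
    subst hn
    match d with
    | 0 =>
      rw [goB]
      split
      · rename_i h
        rw [goA_zero_none h]
      · rename_i j h
        have hle := findOpen_le h
        rw [goA_zero_some h, ih (s.drop (j + 2)).length (by simp; omega) _ _ rfl]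
    | d + 1 =>
      rw [goB]
      split
      · rename_i h1 h2
        rw [goA_pos_none h1 h2]
      · rename_i o h1 h2
        have hle := findOpen_le h1
        rw [goA_pos_open h1 (Or.inl h2),
          ih (s.drop (o + 2)).length (by simp; omega) _ _ rfl]
      · rename_i c h1 h2
        have hle := findClose_le h2
        rw [goA_pos_close h2 (Or.inl h1),
          ih (s.drop (c + 2)).length (by simp; omega) _ _ rfl]
      · rename_i o c h1 h2
        have hleo := findOpen_le h1
        have hlec := findClose_le h2
        have hne : o ≠ c := by
          intro heq
          subst heq
          have := (findOpen_get h1).symm.trans (findClose_get h2)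
          simp at this
        by_cases hoc : o < c
        · rw [if_pos hoc, goA_pos_open h1 (Or.inr ⟨c, h2, hoc⟩),
            ih (s.drop (o + 2)).length (by simp; omega) _ _ rfl]
        · rw [if_neg hoc, goA_pos_close h2 (Or.inr ⟨o, h1, by omega⟩),
            ih (s.drop (c + 2)).length (by simp; omega) _ _ rfl]

-- ===== VERDICT (by name: the statement is the Claim_ definition above) =====
theorem strip_coq_comments_spec : Claim_equal_strip_coq_comments := by
  intro src _
  unfold Spec_strip_coq_comments strip_coq_comments strip_coq_comments_alt
  rw [goB_eq_goA]
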